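-- pv_equiv track=rewrite | github.com/jnh129/Misc | number_theory.py | quadratic_residue_test
-- ===== SOURCE A (Python) =====
-- def relative_prime(a,b): #True = relatively prime, #False = not relatively prime
--     if a == 1 or b == 1:
--         return True
--     elif a == b:
--         return False
--     else:
--         c = 2
--         while c < a:
--             if a % c == 0:
--                 if b % c == 0:
--                     return False
--                 else:
--                     c += 1
--             else:
--                 c += 1
--         return True
--
-- def quadratic_residue_test(a,m):
--     if relative_prime(a, m) == True:
--         x = 1
--         while x < m:
--             y = x**2
--             if y % a == m:
--                 return True
--             else:
--                 x += 1
--         return False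
--     else:
--         return False
-- ===== SOURCE B (Python) =====
-- import math
--
-- def quadratic_residue_test(a, m):
--     # coprimality by Euclid's gcd instead of trial division;
--     # residues x*x % a lie in [0, a) (or (a, 0] for a < 0), so unless
--     # 2 <= m < a no x can match and we answer False without looping.
--     if math.gcd(a, m) != 1:
--         return False
--     if not (2 <= m < a):
--         return False
--     return any(x * x % a == m for x in range(1, m))
-- ===== Notes on version B (the rewrite author's own statement) =====
-- stated objective: faster
-- what changed: replaces the O(a) trial-division coprimality loop by Euclid's gcd and short-circuits the quadratic search with the bound 2 <= m < a (a residue mod a can never equal m otherwise), so the search loop only runs when m < a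
import Mathlib
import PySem

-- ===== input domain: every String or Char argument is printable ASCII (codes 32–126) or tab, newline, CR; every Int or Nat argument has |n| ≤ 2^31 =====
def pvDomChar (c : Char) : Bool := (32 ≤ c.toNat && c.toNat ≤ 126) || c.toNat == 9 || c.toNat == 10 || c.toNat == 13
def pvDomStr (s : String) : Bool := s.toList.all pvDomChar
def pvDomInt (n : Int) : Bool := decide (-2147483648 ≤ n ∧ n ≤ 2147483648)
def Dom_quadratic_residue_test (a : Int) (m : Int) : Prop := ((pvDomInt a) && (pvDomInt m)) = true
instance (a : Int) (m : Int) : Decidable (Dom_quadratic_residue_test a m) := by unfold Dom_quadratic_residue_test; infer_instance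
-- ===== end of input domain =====

-- B replaces A's O(a) trial-division coprimality loop by Euclid's gcd and skips the
-- quadratic search unless 2 <= m < a (objective: faster, asymptotic on the gcd part).


-- ===== PORT A =====
-- while c < a: if a % c == 0 and b % c == 0: return False else c += 1; return True
def rpLoop (a b c : Int) : Bool :=
  if h : c < a then
    if PySem.Int.mod a c = 0 then
      if PySem.Int.mod b c = 0 then false
      else rpLoop a b (c + 1)
    else rpLoop a b (c + 1)
  else true
termination_by (a - c).toNat
decreasing_by all_goals omega

def relative_prime (a b : Int) : Bool :=
  if a = 1 ∨ b = 1 then true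
  else if a = b then false
  else rpLoop a b 2

-- while x < m: y = x**2; if y % a == m: return True else x += 1; return False
def qrLoop (a m x : Int) : Bool :=
  if h : x < m then
    if PySem.Int.mod (x ^ 2) a = m then true
    else qrLoop a m (x + 1)
  else false
termination_by (m - x).toNat
decreasing_by omega

def quadratic_residue_test (a : Int) (m : Int) : Bool :=
  if relative_prime a m = true then qrLoop a m 1 else false

-- ===== PORT B =====
def quadratic_residue_test_alt (a : Int) (m : Int) : Bool :=
  if Int.gcd a m ≠ 1 then false
  else if ¬ (2 ≤ m ∧ m < a) then false
  else (PySem.List.pyRange 1 m 1).any fun x => PySem.Int.mod (x * x) a == m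

-- ===== PRECONDITION & SPEC =====
-- Pre_ excludes exactly the inputs where A raises ZeroDivisionError at 'y % a' (a = 0 with m ≥ 2).
def Pre_quadratic_residue_test (a : Int) (m : Int) : Prop := ¬ (a = 0 ∧ 2 ≤ m)
instance (a : Int) (m : Int) : Decidable (Pre_quadratic_residue_test a m) := by
  unfold Pre_quadratic_residue_test; infer_instance

def pvWitness_quadratic_residue_test : Int × Int := (7, 2)

def Spec_quadratic_residue_test (a : Int) (m : Int) (out : Bool) : Prop := out = quadratic_residue_test_alt a m
instance (a : Int) (m : Int) (out : Bool) : Decidable (Spec_quadratic_residue_test a m out) := by unfold Spec_quadratic_residue_test; infer_instance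

-- ===== CLAIM (what is proved, stated in full; the proofs are below) =====
def Claim_equal_quadratic_residue_test : Prop := ∀ (a : Int) (m : Int), Dom_quadratic_residue_test a m → Pre_quadratic_residue_test a m → Spec_quadratic_residue_test a m (quadratic_residue_test a m)

-- ===== LEMMAS AND PROOFS =====

-- A's search loop is the 'any' over range(1, m) that B computes.
lemma qrLoop_eq (a m x : Int) :
    qrLoop a m x = ((PySem.List.pyRange x m 1).any fun t => PySem.Int.mod (t * t) a == m) := by
  rw [qrLoop]
  by_cases h : x < m
  · rw [dif_pos h, PySem.List.pyRange_one_cons h, List.any_cons, qrLoop_eq a m (x + 1)]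
    by_cases hx : PySem.Int.mod (x ^ 2) a = m
    · simp [← hx, pow_two]
    · rw [if_neg hx]
      have : ¬ PySem.Int.mod (x * x) a = m := by rwa [← pow_two]
      simp [this]
  · rw [dif_neg h]
    have : PySem.List.pyRange x m 1 = [] := by
      rw [PySem.List.pyRange_one]
      have : (m - x).toNat = 0 := by omega
      simp [this]
    simp [this]
termination_by (m - x).toNat
decreasing_by omega

-- A's trial-division loop succeeds iff no c in [c0, a) divides both a and b.
lemma rpLoop_iff (a b c : Int) :
    rpLoop a b c = true ↔ ∀ t : Int, c ≤ t → t < a → ¬ (t ∣ a ∧ t ∣ b) := by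
  rw [rpLoop]
  by_cases h : c < a
  · rw [dif_pos h]
    by_cases ha : PySem.Int.mod a c = 0
    · rw [if_pos ha]
      by_cases hb : PySem.Int.mod b c = 0
      · rw [if_pos hb]
        constructor
        · intro hft
          exact absurd hft (by simp)
        · intro hall
          exfalso
          refine hall c (le_refl c) h ?_
          simp only [PySem.Int.mod_eq_zero_iff_dvd] at ha hb
          exact ⟨ha, hb⟩
      · rw [if_neg hb, rpLoop_iff a b (c + 1)]
        constructor
        · intro ih t hct hta hdvd
          rcases eq_or_lt_of_le hct with rfl | hlt
          · exact hb (by rw [PySem.Int.mod_eq_zero_iff_dvd]; exact hdvd.2)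
          · exact ih t (by omega) hta hdvd
        · intro hall t hct hta
          exact hall t (by omega) hta
    · rw [if_neg ha, rpLoop_iff a b (c + 1)]
      constructor
      · intro ih t hct hta hdvd
        rcases eq_or_lt_of_le hct with rfl | hlt
        · exact ha (by rw [PySem.Int.mod_eq_zero_iff_dvd]; exact hdvd.1)
        · exact ih t (by omega) hta hdvd
      · intro hall t hct hta
        exact hall t (by omega) hta
  · rw [dif_neg h]
    simp only [true_iff]
    intro t hct hta
    omega
termination_by (a - c).toNat
decreasing_by all_goals omega

-- outside the window 2 ≤ m < a (and a ≠ 0 when m ≥ 2), no x matches, so the search is False.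
lemma any_false_of_out (a m : Int) (hpre : ¬ (a = 0 ∧ 2 ≤ m)) (hout : ¬ (2 ≤ m ∧ m < a)) :
    ((PySem.List.pyRange 1 m 1).any fun t => PySem.Int.mod (t * t) a == m) = false := by
  rw [List.any_eq_false]
  intro t ht
  rw [PySem.List.mem_pyRange_one] at ht
  have hm2 : 2 ≤ m := by omega
  intro heq
  rw [beq_iff_eq] at heq
  rcases lt_trichotomy a 0 with hneg | hz | hpos
  · have h2 := (PySem.Int.mod_neg_bounds (t * t) hneg).2
    rw [heq] at h2
    omega
  · exact hpre ⟨hz, hm2⟩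
  · have h1 := PySem.Int.mod_lt (t * t) hpos
    rw [heq] at h1
    exact hout ⟨hm2, h1⟩

-- ===== VERDICT (by name: the statement is the Claim_ definition above) =====
theorem quadratic_residue_test_spec : Claim_equal_quadratic_residue_test := by
  intro a m _hdom hpre
  unfold Spec_quadratic_residue_test
  unfold Pre_quadratic_residue_test at hpre
  by_cases hg : Int.gcd a m = 1
  · by_cases hwin : 2 ≤ m ∧ m < a
    · have halt : quadratic_residue_test_alt a m
          = ((PySem.List.pyRange 1 m 1).any fun x => PySem.Int.mod (x * x) a == m) := by
        unfold quadratic_residue_test_alt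
        rw [if_neg (by simp [hg]), if_neg (by simp [hwin.1, hwin.2])]
      have hrp : relative_prime a m = true := by
        unfold relative_prime
        rw [if_neg (by push Not; omega), if_neg (by omega), rpLoop_iff]
        rintro t h2t hta ⟨hda, hdm⟩
        have hdg : t ∣ (Int.gcd a m : Int) := Int.dvd_coe_gcd hda hdm
        rw [hg] at hdg
        have := Int.le_of_dvd (by norm_num) hdg
        omega
      unfold quadratic_residue_test
      rw [if_pos hrp, halt, qrLoop_eq]
    · have halt : quadratic_residue_test_alt a m = false := by
        unfold quadratic_residue_test_alt
        rw [if_neg (by simp [hg]), if_pos hwin]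
      rw [halt]
      unfold quadratic_residue_test
      by_cases hrp : relative_prime a m = true
      · rw [if_pos hrp, qrLoop_eq, any_false_of_out a m hpre hwin]
      · rw [if_neg hrp]
  · have halt : quadratic_residue_test_alt a m = false := by
      unfold quadratic_residue_test_alt
      rw [if_pos hg]
    rw [halt]
    unfold quadratic_residue_test
    by_cases hrp : relative_prime a m = true
    · rw [if_pos hrp, qrLoop_eq, List.any_eq_false]
      intro t ht
      rw [PySem.List.mem_pyRange_one] at ht
      have hm2 : 2 ≤ m := by omega
      intro heq
      rw [beq_iff_eq] at heq
      rcases lt_trichotomy a 0 with hneg | hz | hpos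
      · have h2 := (PySem.Int.mod_neg_bounds (t * t) hneg).2
        rw [heq] at h2
        omega
      · exact hpre ⟨hz, hm2⟩
      have hma : m < a := by
        have h1 := PySem.Int.mod_lt (t * t) hpos
        rw [heq] at h1
        exact h1
      have ha3 : 3 ≤ a := by omega
      unfold relative_prime at hrp
      rw [if_neg (by push Not; omega), if_neg (by omega), rpLoop_iff] at hrp
      have hga : (Int.gcd a m : Int) ∣ a := Int.gcd_dvd_left a m
      have hgm : (Int.gcd a m : Int) ∣ m := Int.gcd_dvd_right a m
      have hgpos : 0 < Int.gcd a m := Int.gcd_pos_of_ne_zero_left m (by omega)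
      have hg2 : 2 ≤ (Int.gcd a m : Int) := by
        omega
      have hglt : (Int.gcd a m : Int) < a := by
        have := Int.le_of_dvd (by omega : (0:Int) < m) hgm
        omega
      exact hrp (Int.gcd a m) hg2 hglt ⟨hga, hgm⟩
    · rw [if_neg hrp]
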